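-- pv_equiv track=rewrite | github.com/pcruzparri/Misc | jupyter_notebooks/Proteomics/Disassembly Sequence Optimization key steps.py | make_individual
-- ===== SOURCE A (Python) =====
-- from typing import List, Tuple, Dict, Set
--
-- Individual = Tuple[List[int], List[int]]  # (seq, x)
--
-- def topo_sort(seq: List[int], precedence: Dict[int, List[int]]) -> List[int]:
--     """
--     Repair helper: returns a topologically valid permutation using
--     the relative order in 'seq' as a tie-breaker to preserve intent.
--     """
--     # Build graph / indegree from precedence restricted to items in seq
--     present = set(seq)
--     preds = {j: [p for p in precedence.get(j, []) if p in present] for j in present}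
--     indeg = {j: 0 for j in present}
--     for j, ps in preds.items():
--         for p in ps:
--             indeg[j] += 1
--
--     # stable queue using original order for determinism
--     order_index = {op: i for i, op in enumerate(seq)}
--     q = [j for j in present if indeg[j] == 0]
--     q.sort(key=lambda j: order_index[j])
--
--     out = []
--     while q:
--         j = q.pop(0)
--         out.append(j)
--         for k in present:
--             if j in preds.get(k, []):
--                 indeg[k] -= 1
--                 if indeg[k] == 0:
--                     q.append(k)
--                     q.sort(key=lambda x: order_index[x])
--     if len(out) != len(seq):
--         # Cycle or missing items detected; as a fallback keep original order
--         return seq[:]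
--     return out
--
-- def ensure_flags_feasible(seq: List[int], x: List[int],
--                           precedence: Dict[int, List[int]]) -> List[int]:
--     """
--     Ensures that if an operation is marked performed (x[i]==1),
--     all its predecessors in 'seq' are performed as well when required
--     by your domain logic. Here we adopt a conservative rule:
--     a performed operation implies all listed predecessors must be performed.
--     """
--     pos = {op: i for i, op in enumerate(seq)}
--     x = x[:]
--     for i, op in enumerate(seq):
--         if x[i] == 1:
--             for p in precedence.get(op, []):
--                 if p in pos:
--                     x[pos[p]] = 1  # enforce predecessor execution
--     return x
--
-- def make_individual(seq: List[int], x: List[int],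
--                     precedence: Dict[int, List[int]]) -> Individual:
--     """
--     Create/repair an individual to be feasible:
--     - topologically sort seq under precedence
--     - adjust flags x to be consistent with precedence
--     """
--     assert len(seq) == len(x), "seq and x must be the same length"
--     # 1) Remove duplicates while preserving original order (parents may overlap)
--     seen: Set[int] = set()
--     seq_unique, x_unique = [], []
--     for op, flag in zip(seq, x):
--         if op not in seen:
--             seen.add(op)
--             seq_unique.append(op)
--             x_unique.append(1 if flag else 0)
--     # 2) Topological repair
--     seq_fixed = topo_sort(seq_unique, precedence)
--     # 3) Re-align flags with new order
--     index_from_old = {op: i for i, op in enumerate(seq_unique)}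
--     x_fixed = [x_unique[index_from_old[op]] for op in seq_fixed]
--     # 4) Enforce feasibility of flags
--     x_fixed = ensure_flags_feasible(seq_fixed, x_fixed, precedence)
--     return seq_fixed, x_fixed
-- ===== SOURCE B (Python) =====
-- from typing import List, Tuple, Dict
--
-- Individual = Tuple[List[int], List[int]]
--
-- def make_individual(seq: List[int], x: List[int],
--                     precedence: Dict[int, List[int]]) -> Individual:
--     assert len(seq) == len(x), "seq and x must be the same length"
--     # 1) dedup, preserving order; normalize flags to 0/1
--     seen = set()
--     ops: List[int] = []
--     flags: List[int] = []
--     for op, flag in zip(seq, x):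
--         if op not in seen:
--             seen.add(op)
--             ops.append(op)
--             flags.append(1 if flag else 0)
--
--     pos = {op: i for i, op in enumerate(ops)}
--
--     # 2) one pass over the precedence lists: in-degrees (with multiplicity,
--     #    as A counts them) plus successor adjacency (one edge per distinct pred)
--     indeg = {op: 0 for op in ops}
--     succ: Dict[int, List[int]] = {op: [] for op in ops}
--     for k in ops:
--         marked = set()
--         for p in precedence.get(k, []):
--             if p in pos:
--                 indeg[k] += 1
--                 if p not in marked:
--                     marked.add(p)
--                     succ[p].append(k)
--
--     # 3) Kahn's algorithm; 'ready' kept ordered by original position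
--     ready = [op for op in ops if indeg[op] == 0]
--     order: List[int] = []
--     while ready:
--         j = ready.pop(0)
--         order.append(j)
--         for k in succ[j]:
--             indeg[k] -= 1
--             if indeg[k] == 0:
--                 i = len(ready)
--                 while i > 0 and pos[ready[i - 1]] > pos[k]:
--                     i -= 1
--                 ready.insert(i, k)
--     seq_fixed = order if len(order) == len(ops) else ops[:]
--
--     # 4) re-align flags, then enforce predecessor flags in one forward pass
--     flag_of = dict(zip(ops, flags))
--     x_fixed = [flag_of[op] for op in seq_fixed]
--     posf = {op: i for i, op in enumerate(seq_fixed)}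
--     for i, op in enumerate(seq_fixed):
--         if x_fixed[i] == 1:
--             for p in precedence.get(op, []):
--                 if p in posf:
--                     x_fixed[posf[p]] = 1
--     return seq_fixed, x_fixed
-- ===== Notes on version B (the rewrite author's own statement) =====
-- stated objective: faster
-- what changed: A's topo sort rescans every present node and re-sorts the whole ready queue after each decrement hit; B builds successor adjacency lists and in-degrees in one pass over the precedence lists, then runs Kahn's algorithm decrementing only along succ[j] and keeping the ready queue ordered by a single ordered insert, so the per-pop full-graph scan and repeated sorts disappear.
import Mathlib
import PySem

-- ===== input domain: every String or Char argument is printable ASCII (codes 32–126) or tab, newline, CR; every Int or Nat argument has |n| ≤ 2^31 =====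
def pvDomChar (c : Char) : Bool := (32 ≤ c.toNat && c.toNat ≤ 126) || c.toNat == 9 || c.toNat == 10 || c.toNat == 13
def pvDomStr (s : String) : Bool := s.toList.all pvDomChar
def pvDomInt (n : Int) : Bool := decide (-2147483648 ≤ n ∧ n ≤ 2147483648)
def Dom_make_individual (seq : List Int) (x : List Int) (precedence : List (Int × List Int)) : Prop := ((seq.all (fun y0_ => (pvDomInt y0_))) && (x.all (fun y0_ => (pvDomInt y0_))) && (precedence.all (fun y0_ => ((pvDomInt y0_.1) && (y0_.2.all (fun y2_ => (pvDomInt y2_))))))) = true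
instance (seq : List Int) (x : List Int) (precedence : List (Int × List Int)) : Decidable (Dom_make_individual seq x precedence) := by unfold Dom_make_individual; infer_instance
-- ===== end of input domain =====

-- B replaces A's Kahn loop (rescan of every node per pop + full re-sort of the queue
-- aftereach append) by successor adjacency lists built in one pass and an ordered insert
-- into the ready queue; objective: faster (in a timing run) / alternative.

-- shared helper: Python's `{op: i for i, op in enumerate(l)}` (appears verbatim in both programs)
def pyEnumDict (l : List Int) : PySem.Dict Int Int :=
  l.zipIdx.foldl (fun d p => d.insert p.1 (p.2 : Int)) PySem.Dict.empty

-- shared helper: the duplicate-removal loop (verbatim the same in both programs):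
-- returns (seen, seq_unique, x_unique)
def pyDedup (pairs : List (Int × Int)) : PySem.Set Int × List Int × List Int :=
  pairs.foldl (fun st q =>
    if PySem.Set.contains st.1 q.1 then st
    else (PySem.Set.add st.1 q.1, st.2.1 ++ [q.1], st.2.2 ++ [if q.2 ≠ 0 then (1 : Int) else 0]))
    (PySem.Set.empty, [], [])

-- ===== PORT A =====
-- the `while q:` loop of topo_sort; fuel = len(seq) bounds the number of pops
-- (each node enters q at most once, so the guard never fires on a real run)
def topoLoopA (present : List Int) (preds : PySem.Dict Int (List Int))
    (oi : PySem.Dict Int Int) :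
    Nat → List Int → PySem.Dict Int Int → List Int → List Int
  | 0, _, _, out => out
  | _ + 1, [], _, out => out
  | fuel + 1, j :: rest, indeg, out =>
    let st := present.foldl (fun (st : List Int × PySem.Dict Int Int) k =>
      if (preds.getD k []).contains j then
        let d := st.2.modify k 0 (· - 1)
        if d.getD k 0 == 0 then
          (PySem.List.sorted (st.1 ++ [k]) (fun y => oi.getD y 0), d)
        else (st.1, d)
      else st) (rest, indeg)
    topoLoopA present preds oi fuel st.1 st.2 (out ++ [j])

def topo_sort (seq : List Int) (prec : PySem.Dict Int (List Int)) : List Int :=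
  let present : PySem.Set Int := PySem.Set.ofList seq
  let preds : PySem.Dict Int (List Int) :=
    present.foldl (fun d j =>
      d.insert j ((prec.getD j []).filter (fun p => PySem.Set.contains present p)))
      PySem.Dict.empty
  let indeg0 : PySem.Dict Int Int :=
    present.foldl (fun d j => d.insert j 0) PySem.Dict.empty
  let indeg := preds.items.foldl
    (fun d jp => jp.2.foldl (fun d2 _ => d2.modify jp.1 0 (· + 1)) d) indeg0
  let oi := pyEnumDict seq
  let q := PySem.List.sorted (present.filter (fun j => indeg.getD j 0 == 0))
    (fun j => oi.getD j 0)
  let out := topoLoopA present preds oi seq.length q indeg []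
  if out.length ≠ seq.length then seq else out

def ensure_flags_feasible (seq : List Int) (x : List Int)
    (prec : PySem.Dict Int (List Int)) : List Int :=
  let pos := pyEnumDict seq
  seq.zipIdx.foldl (fun xc q =>
    if PySem.List.pyGetD xc (q.2 : Int) 0 == 1 then
      (prec.getD q.1 []).foldl (fun xc2 p =>
        if pos.contains p then PySem.List.pySetD xc2 (pos.getD p 0) 1 else xc2) xc
    else xc) x

def make_individual (seq : List Int) (x : List Int)
    (precedence : List (Int × List Int)) : List Int × List Int :=
  let prec := PySem.Dict.ofList precedence
  let st := pyDedup (seq.zip x)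
  let squ := st.2.1
  let xu := st.2.2
  let seq_fixed := topo_sort squ prec
  let index_from_old := pyEnumDict squ
  let x0 := seq_fixed.map (fun op => PySem.List.pyGetD xu (index_from_old.getD op 0) 0)
  (seq_fixed, ensure_flags_feasible seq_fixed x0 prec)

-- ===== PORT B =====
-- the `while i > 0 and pos[ready[i-1]] > pos[k]: …; ready.insert(i, k)` right-to-left scan
def insScanB (pos : PySem.Dict Int Int) (k : Int) : List Int → List Int
  | [] => [k]
  | a :: t => if pos.getD a 0 > pos.getD k 0 then a :: insScanB pos k t else k :: a :: t

def insertReadyB (pos : PySem.Dict Int Int) (ready : List Int) (k : Int) : List Int :=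
  (insScanB pos k ready.reverse).reverse

-- one pass over the precedence lists: in-degrees (with multiplicity) + successor adjacency
def buildB (prec : PySem.Dict Int (List Int)) (pos : PySem.Dict Int Int)
    (ops : List Int) : PySem.Dict Int Int × PySem.Dict Int (List Int) :=
  let indeg0 : PySem.Dict Int Int :=
    ops.foldl (fun d op => d.insert op 0) PySem.Dict.empty
  let succ0 : PySem.Dict Int (List Int) :=
    ops.foldl (fun d op => d.insert op []) PySem.Dict.empty
  ops.foldl (fun st k =>
    let inner := (prec.getD k []).foldl
      (fun (st2 : PySem.Dict Int Int × PySem.Dict Int (List Int) × PySem.Set Int) p =>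
        if pos.contains p then
          let ind := st2.1.modify k 0 (· + 1)
          if PySem.Set.contains st2.2.2 p then (ind, st2.2.1, st2.2.2)
          else (ind, st2.2.1.modify p [] (· ++ [k]), PySem.Set.add st2.2.2 p)
        else st2) (st.1, st.2, PySem.Set.empty)
    (inner.1, inner.2.1)) (indeg0, succ0)

-- Kahn's loop: pop the front of the ordered ready list, decrement along succ[j] only
def kahnLoopB (succ : PySem.Dict Int (List Int)) (pos : PySem.Dict Int Int) :
    Nat → List Int → PySem.Dict Int Int → List Int → List Int
  | 0, _, _, order => order
  | _ + 1, [], _, order => order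
  | fuel + 1, j :: rest, indeg, order =>
    let st := (succ.getD j []).foldl (fun (st : List Int × PySem.Dict Int Int) k =>
      let d := st.2.modify k 0 (· - 1)
      if d.getD k 0 == 0 then (insertReadyB pos st.1 k, d) else (st.1, d)) (rest, indeg)
    kahnLoopB succ pos fuel st.1 st.2 (order ++ [j])

def make_individual_alt (seq : List Int) (x : List Int)
    (precedence : List (Int × List Int)) : List Int × List Int :=
  let prec := PySem.Dict.ofList precedence
  let st := pyDedup (seq.zip x)
  let ops := st.2.1
  let flags := st.2.2
  let pos := pyEnumDict ops
  let bs := buildB prec pos ops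
  let ready := ops.filter (fun op => bs.1.getD op 0 == 0)
  let order := kahnLoopB bs.2 pos ops.length ready bs.1 []
  let seq_fixed := if order.length == ops.length then order else ops
  let flag_of := PySem.Dict.ofList (ops.zip flags)
  let x0 := seq_fixed.map (fun op => flag_of.getD op 0)
  let posf := pyEnumDict seq_fixed
  let xf := seq_fixed.zipIdx.foldl (fun xc q =>
    if PySem.List.pyGetD xc (q.2 : Int) 0 == 1 then
      (prec.getD q.1 []).foldl (fun xc2 p =>
        if posf.contains p then PySem.List.pySetD xc2 (posf.getD p 0) 1 else xc2) xc
    else xc) x0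
  (seq_fixed, xf)

-- ===== PRECONDITION & SPEC =====
-- Pre_ excludes exactly the inputs where A raises: the `assert len(seq) == len(x)`
def Pre_make_individual (seq : List Int) (x : List Int)
    (precedence : List (Int × List Int)) : Prop := seq.length = x.length
instance (seq : List Int) (x : List Int) (precedence : List (Int × List Int)) :
    Decidable (Pre_make_individual seq x precedence) := by
  unfold Pre_make_individual; infer_instance

def pvWitness_make_individual : List Int × List Int × (List (Int × List Int)) :=
  ([3, 1, 2, 1], [1, 0, 1, 1], [(2, [3]), (1, [2])])

def Spec_make_individual (seq : List Int) (x : List Int)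
    (precedence : List (Int × List Int)) (out : List Int × List Int) : Prop :=
  out = make_individual_alt seq x precedence
instance (seq : List Int) (x : List Int) (precedence : List (Int × List Int))
    (out : List Int × List Int) : Decidable (Spec_make_individual seq x precedence out) := by
  unfold Spec_make_individual; infer_instance

-- ===== CLAIM (what is proved, stated in full; the proofs are below) =====
def Claim_equal_make_individual : Prop := ∀ (seq : List Int) (x : List Int) (precedence : List (Int × List Int)), Dom_make_individual seq x precedence → Pre_make_individual seq x precedence → Spec_make_individual seq x precedence (make_individual seq x precedence)


-- ===== LEMMAS AND PROOFS =====

-- canonical form of "the predecessors of k that are present", used to align both builds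
def predListK (prec : PySem.Dict Int (List Int)) (ops : List Int) (k : Int) : List Int :=
  (prec.getD k []).filter (fun p => decide (p ∈ ops))

-- ---- dedup invariants ----
lemma pyDedup_aux (pairs : List (Int × Int)) (s0 : PySem.Set Int) (u0 v0 : List Int)
    (h1 : u0.Nodup) (h2 : ∀ y : Int, y ∈ s0 ↔ y ∈ u0) (h3 : u0.length = v0.length) :
    (pairs.foldl (fun st q =>
      if PySem.Set.contains st.1 q.1 then st
      else (PySem.Set.add st.1 q.1, st.2.1 ++ [q.1], st.2.2 ++ [if q.2 ≠ 0 then (1 : Int) else 0]))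
      (s0, u0, v0)).2.1.Nodup ∧
    (pairs.foldl (fun st q =>
      if PySem.Set.contains st.1 q.1 then st
      else (PySem.Set.add st.1 q.1, st.2.1 ++ [q.1], st.2.2 ++ [if q.2 ≠ 0 then (1 : Int) else 0]))
      (s0, u0, v0)).2.1.length =
    (pairs.foldl (fun st q =>
      if PySem.Set.contains st.1 q.1 then st
      else (PySem.Set.add st.1 q.1, st.2.1 ++ [q.1], st.2.2 ++ [if q.2 ≠ 0 then (1 : Int) else 0]))
      (s0, u0, v0)).2.2.length := by
  induction pairs generalizing s0 u0 v0 with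
  | nil => exact ⟨h1, h3⟩
  | cons q t ih =>
    simp only [List.foldl_cons]
    by_cases hmem : q.1 ∈ s0
    · have : PySem.Set.contains s0 q.1 = true := (PySem.Set.contains_iff s0 q.1).mpr hmem
      simp only [this, if_true]
      exact ih s0 u0 v0 h1 h2 h3
    · have : PySem.Set.contains s0 q.1 = false := by
        simpa using (fun h => hmem ((PySem.Set.contains_iff s0 q.1).mp h))
      simp only [this, Bool.false_eq_true, if_false]
      refine ih _ _ _ ?_ ?_ ?_
      · simp only [List.nodup_append, List.nodup_cons]
        refine ⟨h1, ⟨List.not_mem_nil, List.nodup_nil⟩, ?_⟩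
        intro a ha b hb
        simp only [List.mem_singleton] at hb
        subst hb
        exact fun h => absurd ((h2 q.1).mpr (h ▸ ha)) hmem
      · intro y
        simp [PySem.Set.mem_add, h2]
      · simp [h3]

lemma pyDedup_nodup (pairs : List (Int × Int)) : (pyDedup pairs).2.1.Nodup := by
  exact (pyDedup_aux pairs PySem.Set.empty [] [] (by simp) (by simp [PySem.Set.empty]) rfl).1

lemma pyDedup_len (pairs : List (Int × Int)) :
    (pyDedup pairs).2.1.length = (pyDedup pairs).2.2.length := by
  exact (pyDedup_aux pairs PySem.Set.empty [] [] (by simp) (by simp [PySem.Set.empty]) rfl).2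

-- ---- pyEnumDict characterisation ----
lemma pyEnumDict_items (l : List Int) (hl : l.Nodup) :
    (pyEnumDict l).items = l.zipIdx.map (fun p => (p.1, (p.2 : Int))) := by
  have h := PySem.Dict.items_foldl_insert_fresh (l.zipIdx) Prod.fst (fun p => (p.2 : Int))
    PySem.Dict.empty (by intro a _; exact PySem.Dict.contains_empty _)
    (by rw [List.zipIdx_map_fst]; exact hl)
  simpa [pyEnumDict] using h

lemma pyEnumDict_keys (l : List Int) : (pyEnumDict l).keys = PySem.Set.ofList l := by
  have h := PySem.Dict.keys_foldl_insert_key (ν := Int) (l.zipIdx) Prod.fst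
    (fun _ p => (p.2 : Int)) PySem.Dict.empty
  simpa [pyEnumDict, List.zipIdx_map_fst, PySem.Set.update_empty] using h

lemma pyEnumDict_getD (l : List Int) (hl : l.Nodup) (i : Nat) (hi : i < l.length) :
    (pyEnumDict l).getD l[i] 0 = (i : Int) := by
  refine PySem.Dict.getD_of_mem_items _ ?_ ?_ 0
  · rw [pyEnumDict_items l hl]
    refine List.mem_map.mpr ⟨(l[i], i), ?_, rfl⟩
    have : (l.zipIdx)[i]'(by simpa using hi) = (l[i], i) := by
      simp [List.getElem_zipIdx]
    exact this ▸ List.getElem_mem _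
  · rw [pyEnumDict_keys l, PySem.Set.ofList_eq_self_of_nodup l hl]; exact hl

lemma pyEnumDict_contains (l : List Int) (y : Int) :
    (pyEnumDict l).contains y = decide (y ∈ l) := by
  rw [PySem.Dict.contains_eq_decide_mem_keys, pyEnumDict_keys l]
  simp [PySem.Set.mem_ofList]

-- ---- dict of zipped flags ----
lemma zipDict_getD (ops flags : List Int) (hn : ops.Nodup) (hl : ops.length = flags.length)
    (i : Nat) (hi : i < ops.length) :
    (PySem.Dict.ofList (ops.zip flags)).getD ops[i] 0 = flags[i]'(hl ▸ hi) := by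
  have hfst : List.map Prod.fst (ops.zip flags) = ops := by
    have := @List.map_fst_zip Int Int ops flags
    simp [hl] at this ⊢
    exact this
  have hitems : (PySem.Dict.ofList (ops.zip flags)).items = ops.zip flags := by
    have h := PySem.Dict.items_foldl_insert_fresh (ops.zip flags) Prod.fst Prod.snd
      PySem.Dict.empty (by intro a _; exact PySem.Dict.contains_empty _) (by rw [hfst]; exact hn)
    simpa [PySem.Dict.ofList, PySem.Dict.update] using h
  refine PySem.Dict.getD_of_mem_items _ ?_ ?_ 0
  · rw [hitems]
    have : (ops.zip flags)[i]'(by simp [List.length_zip]; omega) = (ops[i], flags[i]'(hl ▸ hi)) := by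
      simp
    exact this ▸ List.getElem_mem _
  · simpa [PySem.Dict.keys, hitems, hfst] using hn

-- ---- generic fold lemmas ----
lemma getD_foldl_insert_const {ν : Type} (l : List Int) (c : ν) (d : PySem.Dict Int ν)
    (y : Int) (d0 : ν) :
    (l.foldl (fun d j => d.insert j c) d).getD y d0 = if y ∈ l then c else d.getD y d0 := by
  induction l generalizing d with
  | nil => simp
  | cons j t ih =>
    simp only [List.foldl_cons, ih, PySem.Dict.getD_insert, List.mem_cons]
    by_cases h1 : y ∈ t <;> by_cases h2 : y = j <;> simp [h1, h2]

lemma getD_foldl_modify_rep {β : Type} (L : List β) (j : Int) (d : PySem.Dict Int Int) (y : Int) :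
    (L.foldl (fun d2 _ => d2.modify j 0 (· + 1)) d).getD y 0 =
      d.getD y 0 + (if y = j then (L.length : Int) else 0) := by
  induction L generalizing d with
  | nil => simp
  | cons a t ih =>
    simp only [List.foldl_cons, ih, PySem.Dict.getD_modify]
    by_cases h : y = j <;> simp [h] <;> omega

-- ---- A-side graph construction ----
lemma setContains_decide (s : PySem.Set Int) (p : Int) :
    PySem.Set.contains s p = decide (p ∈ s) := by
  rw [Bool.eq_iff_iff, PySem.Set.contains_iff]
  exact ⟨fun h => by simpa using h, fun h => by simpa using h⟩

lemma predsA_items (prec : PySem.Dict Int (List Int)) (ops : List Int) (hn : ops.Nodup) :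
    (ops.foldl (fun d j =>
      d.insert j ((prec.getD j []).filter (fun p => PySem.Set.contains ops p)))
      PySem.Dict.empty).items = ops.map (fun j => (j, predListK prec ops j)) := by
  have hc : (fun p => PySem.Set.contains ops p) = (fun p : Int => decide (p ∈ ops)) :=
    funext (setContains_decide ops)
  simp only [hc]
  have h := PySem.Dict.items_foldl_insert_fresh ops (fun j => j)
    (fun j => (prec.getD j []).filter (fun p : Int => decide (p ∈ ops)))
    PySem.Dict.empty (by intro a _; exact PySem.Dict.contains_empty _) (by simpa using hn)
  simpa [predListK] using h

lemma predsA_getD (prec : PySem.Dict Int (List Int)) (ops : List Int) (hn : ops.Nodup)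
    (k : Int) (hk : k ∈ ops) :
    (ops.foldl (fun d j =>
      d.insert j ((prec.getD j []).filter (fun p => PySem.Set.contains ops p)))
      PySem.Dict.empty).getD k [] = predListK prec ops k := by
  refine PySem.Dict.getD_of_mem_items _ ?_ ?_ []
  · rw [predsA_items prec ops hn]
    exact List.mem_map.mpr ⟨k, hk, rfl⟩
  · rw [PySem.Dict.keys, predsA_items prec ops hn]
    simpa [Function.comp_def] using hn

lemma fold_rep_getD (F : Int → List Int) (l : List Int) (hl : l.Nodup)
    (d : PySem.Dict Int Int) (y : Int) :
    (l.foldl (fun d j => (F j).foldl (fun d2 _ => d2.modify j 0 (· + 1)) d) d).getD y 0 =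
      if y ∈ l then d.getD y 0 + ((F y).length : Int) else d.getD y 0 := by
  induction l generalizing d with
  | nil => simp
  | cons j t ih =>
    simp only [List.nodup_cons] at hl
    simp only [List.foldl_cons]
    rw [ih hl.2]
    simp only [getD_foldl_modify_rep, List.mem_cons]
    by_cases h1 : y ∈ t <;> by_cases h2 : y = j
    · exact absurd (h2 ▸ h1) hl.1
    · simp [h1, h2]
    · subst h2; simp [h1]
    · simp [h1, h2]

lemma indegA_getD (prec : PySem.Dict Int (List Int)) (ops : List Int) (hn : ops.Nodup) (y : Int) :
    ((ops.map (fun j => (j, predListK prec ops j))).foldl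
      (fun d jp => jp.2.foldl (fun d2 _ => d2.modify jp.1 0 (· + 1)) d)
      (ops.foldl (fun d j => d.insert j 0) PySem.Dict.empty)).getD y 0 =
      if y ∈ ops then ((predListK prec ops y).length : Int) else 0 := by
  rw [List.foldl_map]
  have h := fold_rep_getD (predListK prec ops) ops hn
    (ops.foldl (fun d j => d.insert j 0) PySem.Dict.empty) y
  simp only [h, getD_foldl_insert_const, PySem.Dict.getD_empty]
  by_cases hy : y ∈ ops <;> simp [hy]

-- ---- B-side graph construction ----
-- the inner loop over one precedence list, for the fixed source k
lemma buildB_inner (pos : PySem.Dict Int Int) (ops : List Int)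
    (hpos : ∀ p : Int, pos.contains p = decide (p ∈ ops)) (k : Int) (L : List Int) :
    ∀ (I : PySem.Dict Int Int) (S : PySem.Dict Int (List Int)) (m : PySem.Set Int),
    (∀ y, (L.foldl
      (fun (st2 : PySem.Dict Int Int × PySem.Dict Int (List Int) × PySem.Set Int) p =>
        if pos.contains p then
          let ind := st2.1.modify k 0 (· + 1)
          if PySem.Set.contains st2.2.2 p then (ind, st2.2.1, st2.2.2)
          else (ind, st2.2.1.modify p [] (· ++ [k]), PySem.Set.add st2.2.2 p)
        else st2) (I, S, m)).1.getD y 0 =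
      I.getD y 0 + (if y = k then ((L.filter (fun p => decide (p ∈ ops))).length : Int) else 0)) ∧
    (∀ j, (L.foldl
      (fun (st2 : PySem.Dict Int Int × PySem.Dict Int (List Int) × PySem.Set Int) p =>
        if pos.contains p then
          let ind := st2.1.modify k 0 (· + 1)
          if PySem.Set.contains st2.2.2 p then (ind, st2.2.1, st2.2.2)
          else (ind, st2.2.1.modify p [] (· ++ [k]), PySem.Set.add st2.2.2 p)
        else st2) (I, S, m)).2.1.getD j [] =
      if j ∈ m then S.getD j []
      else if j ∈ L.filter (fun p => decide (p ∈ ops)) then S.getD j [] ++ [k]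
      else S.getD j []) := by
  induction L with
  | nil => intro I S m; simp
  | cons p t ih =>
    intro I S m
    simp only [List.foldl_cons]
    by_cases hp : p ∈ ops
    · simp only [hpos p, hp, decide_true, if_true]
      by_cases hm : p ∈ m
      · have hcm : PySem.Set.contains m p = true := (PySem.Set.contains_iff m p).mpr hm
        simp only [hcm, if_true]
        refine ⟨fun y => ?_, fun j => ?_⟩
        · rw [(ih _ _ _).1 y, PySem.Dict.getD_modify]
          by_cases h2 : y = k <;> simp [h2, hp] <;> omega
        · rw [(ih _ _ _).2 j]
          by_cases hjm : j ∈ m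
          · simp [hjm]
          · have hjp : j ≠ p := fun h => hjm (h ▸ hm)
            simp [hjm, hjp]
      · have hcm : PySem.Set.contains m p = false := by
          rw [Bool.eq_iff_iff, PySem.Set.contains_iff]; simp [hm]
        simp only [hcm, Bool.false_eq_true, if_false]
        refine ⟨fun y => ?_, fun j => ?_⟩
        · rw [(ih _ _ _).1 y, PySem.Dict.getD_modify]
          by_cases h2 : y = k <;> simp [h2, hp] <;> omega
        · rw [(ih _ _ _).2 j]
          by_cases hjp : j = p
          · subst hjp
            simp [hm, hp, PySem.Dict.getD_modify_self]
          · simp only [PySem.Set.mem_add]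
            have hne : j ≠ p := hjp
            rw [PySem.Dict.getD_modify_of_ne _ _ _ hne]
            by_cases hjm : j ∈ m
            · simp [hjm]
            · simp [hjm, hne]
    · simp only [hpos p, hp, decide_false, Bool.false_eq_true, if_false]
      refine ⟨fun y => ?_, fun j => ?_⟩
      · rw [(ih _ _ _).1 y]
        simp [hp]
      · rw [(ih _ _ _).2 j]
        simp [hp]

lemma buildB_indeg (prec : PySem.Dict Int (List Int)) (pos : PySem.Dict Int Int) (ops : List Int)
    (hn : ops.Nodup) (hpos : ∀ p : Int, pos.contains p = decide (p ∈ ops)) (y : Int) :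
    (buildB prec pos ops).1.getD y 0 =
      if y ∈ ops then ((predListK prec ops y).length : Int) else 0 := by
  have aux : ∀ (l : List Int), l.Nodup →
      ∀ (I : PySem.Dict Int Int) (S : PySem.Dict Int (List Int)),
      ((l.foldl (fun st k =>
        let inner := (prec.getD k []).foldl
          (fun (st2 : PySem.Dict Int Int × PySem.Dict Int (List Int) × PySem.Set Int) p =>
            if pos.contains p then
              let ind := st2.1.modify k 0 (· + 1)
              if PySem.Set.contains st2.2.2 p then (ind, st2.2.1, st2.2.2)
              else (ind, st2.2.1.modify p [] (· ++ [k]), PySem.Set.add st2.2.2 p)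
            else st2) (st.1, st.2, PySem.Set.empty)
        (inner.1, inner.2.1)) (I, S)).1).getD y 0 =
      if y ∈ l then I.getD y 0 + ((predListK prec ops y).length : Int) else I.getD y 0 := by
    intro l hl
    induction l with
    | nil => intro I S; simp
    | cons k t ih =>
      simp only [List.nodup_cons] at hl
      intro I S
      simp only [List.foldl_cons]
      rw [ih hl.2]
      rw [(buildB_inner pos ops hpos k (prec.getD k []) I S PySem.Set.empty).1 y]
      simp only [List.mem_cons, predListK]
      by_cases h1 : y ∈ t <;> by_cases h2 : y = k
      · exact absurd (h2 ▸ h1) hl.1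
      · simp [h1, h2]
      · subst h2; simp [h1]
      · simp [h1, h2]
  rw [buildB]
  rw [aux ops hn]
  simp only [getD_foldl_insert_const, PySem.Dict.getD_empty]
  by_cases hy : y ∈ ops <;> simp [hy]

lemma buildB_succ (prec : PySem.Dict Int (List Int)) (pos : PySem.Dict Int Int) (ops : List Int)
    (hpos : ∀ p : Int, pos.contains p = decide (p ∈ ops)) (j : Int) :
    (buildB prec pos ops).2.getD j [] =
      ops.filter (fun k => (predListK prec ops k).contains j) := by
  have aux : ∀ (l : List Int) (I : PySem.Dict Int Int) (S : PySem.Dict Int (List Int)),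
      ((l.foldl (fun st k =>
        let inner := (prec.getD k []).foldl
          (fun (st2 : PySem.Dict Int Int × PySem.Dict Int (List Int) × PySem.Set Int) p =>
            if pos.contains p then
              let ind := st2.1.modify k 0 (· + 1)
              if PySem.Set.contains st2.2.2 p then (ind, st2.2.1, st2.2.2)
              else (ind, st2.2.1.modify p [] (· ++ [k]), PySem.Set.add st2.2.2 p)
            else st2) (st.1, st.2, PySem.Set.empty)
        (inner.1, inner.2.1)) (I, S)).2).getD j [] =
      S.getD j [] ++ (l.filter (fun k => (predListK prec ops k).contains j)) := by
    intro l
    induction l with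
    | nil => intro I S; simp
    | cons k t ih =>
      intro I S
      simp only [List.foldl_cons]
      rw [ih]
      rw [(buildB_inner pos ops hpos k (prec.getD k []) I S PySem.Set.empty).2 j]
      have hem : j ∉ (PySem.Set.empty : PySem.Set Int) := by simp [PySem.Set.empty]
      simp only [hem, if_false, predListK, List.filter_cons]
      by_cases hjk : j ∈ (prec.getD k []).filter (fun p : Int => decide (p ∈ ops))
      · have : ((prec.getD k []).filter (fun p : Int => decide (p ∈ ops))).contains j = true := by
          simpa using hjk
        simp [hjk]
      · have : ((prec.getD k []).filter (fun p : Int => decide (p ∈ ops))).contains j = false := by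
          simpa using hjk
        simp [hjk]
  rw [buildB]
  rw [aux ops]
  simp only [getD_foldl_insert_const, PySem.Dict.getD_empty]
  by_cases hj : j ∈ ops <;> simp [hj]

-- ---- ordered insert vs. re-sort ----
lemma insScanB_perm (pos : PySem.Dict Int Int) (k : Int) (r : List Int) :
    (insScanB pos k r).Perm (k :: r) := by
  induction r with
  | nil => simp [insScanB]
  | cons a t ih =>
    rw [insScanB]
    by_cases h : pos.getD a 0 > pos.getD k 0
    · simp only [h, if_true]
      exact (ih.cons a).trans (List.Perm.swap k a t)
    · simp [h]

lemma insScanB_pairwise (pos : PySem.Dict Int Int) (k : Int) (r : List Int)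
    (hr : r.Pairwise (fun a b => pos.getD b 0 < pos.getD a 0))
    (hne : ∀ a ∈ r, pos.getD a 0 ≠ pos.getD k 0) :
    (insScanB pos k r).Pairwise (fun a b => pos.getD b 0 < pos.getD a 0) := by
  induction r with
  | nil => simp [insScanB]
  | cons a t ih =>
    simp only [List.pairwise_cons] at hr
    rw [insScanB]
    by_cases h : pos.getD a 0 > pos.getD k 0
    · simp only [h, if_true, List.pairwise_cons]
      refine ⟨?_, ih hr.2 (fun b hb => hne b (List.mem_cons_of_mem a hb))⟩
      intro b hb
      have := (insScanB_perm pos k t).mem_iff.mp hb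
      rcases List.mem_cons.mp this with h1 | h1
      · exact h1 ▸ h
      · exact hr.1 b h1
    · simp only [h, if_false]
      have hak : pos.getD a 0 < pos.getD k 0 :=
        lt_of_le_of_ne (not_lt.mp h) (hne a (List.mem_cons_self))
      refine List.Pairwise.cons ?_ (List.Pairwise.cons hr.1 hr.2)
      intro b hb
      rcases List.mem_cons.mp hb with h1 | h1
      · exact h1 ▸ hak
      · exact lt_trans (hr.1 b h1) hak

lemma insertReadyB_eq_sorted (pos : PySem.Dict Int Int) (q : List Int) (k : Int)
    (hq : q.Pairwise (fun a b => pos.getD a 0 < pos.getD b 0))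
    (hne : ∀ a ∈ q, pos.getD a 0 ≠ pos.getD k 0) :
    PySem.List.sorted (q ++ [k]) (fun y => pos.getD y 0) = insertReadyB pos q k := by
  refine PySem.List.sorted_eq_of_perm_of_pairwise_lt _ _ _ ?_ ?_
  · exact (List.reverse_perm _).trans ((insScanB_perm pos k q.reverse).trans
      (((q.reverse_perm).cons k).trans (List.perm_append_singleton k q).symm))
  · rw [insertReadyB, List.pairwise_reverse]
    exact insScanB_pairwise pos k q.reverse
      (by rw [List.pairwise_reverse]; exact hq)
      (fun a ha => hne a (List.mem_reverse.mp ha))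

-- ---- the two Kahn loops agree ----
lemma inner_sim (pos : PySem.Dict Int Int) (ops : List Int)
    (hkey : ∀ a ∈ ops, ∀ b ∈ ops, a ≠ b → pos.getD a 0 ≠ pos.getD b 0)
    (ks : List Int) (hks : ∀ k ∈ ks, k ∈ ops) :
    ∀ (q : List Int) (dA dB : PySem.Dict Int Int),
    q.Pairwise (fun a b => pos.getD a 0 < pos.getD b 0) → (∀ m ∈ q, m ∈ ops) →
    (∀ y, dA.getD y 0 = dB.getD y 0) → (∀ m ∈ q, dA.getD m 0 ≤ 0) →
    (ks.foldl (fun (st : List Int × PySem.Dict Int Int) k =>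
        let d := st.2.modify k 0 (· - 1)
        if d.getD k 0 == 0 then
          (PySem.List.sorted (st.1 ++ [k]) (fun y => pos.getD y 0), d)
        else (st.1, d)) (q, dA)).1 =
      (ks.foldl (fun (st : List Int × PySem.Dict Int Int) k =>
        let d := st.2.modify k 0 (· - 1)
        if d.getD k 0 == 0 then (insertReadyB pos st.1 k, d) else (st.1, d)) (q, dB)).1 ∧
    (∀ y, (ks.foldl (fun (st : List Int × PySem.Dict Int Int) k =>
        let d := st.2.modify k 0 (· - 1)
        if d.getD k 0 == 0 then
          (PySem.List.sorted (st.1 ++ [k]) (fun y => pos.getD y 0), d)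
        else (st.1, d)) (q, dA)).2.getD y 0 =
      (ks.foldl (fun (st : List Int × PySem.Dict Int Int) k =>
        let d := st.2.modify k 0 (· - 1)
        if d.getD k 0 == 0 then (insertReadyB pos st.1 k, d) else (st.1, d)) (q, dB)).2.getD y 0) ∧
    (ks.foldl (fun (st : List Int × PySem.Dict Int Int) k =>
        let d := st.2.modify k 0 (· - 1)
        if d.getD k 0 == 0 then
          (PySem.List.sorted (st.1 ++ [k]) (fun y => pos.getD y 0), d)
        else (st.1, d)) (q, dA)).1.Pairwise (fun a b => pos.getD a 0 < pos.getD b 0) ∧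
    (∀ m ∈ (ks.foldl (fun (st : List Int × PySem.Dict Int Int) k =>
        let d := st.2.modify k 0 (· - 1)
        if d.getD k 0 == 0 then
          (PySem.List.sorted (st.1 ++ [k]) (fun y => pos.getD y 0), d)
        else (st.1, d)) (q, dA)).1, m ∈ ops) ∧
    (∀ m ∈ (ks.foldl (fun (st : List Int × PySem.Dict Int Int) k =>
        let d := st.2.modify k 0 (· - 1)
        if d.getD k 0 == 0 then
          (PySem.List.sorted (st.1 ++ [k]) (fun y => pos.getD y 0), d)
        else (st.1, d)) (q, dA)).1,
      (ks.foldl (fun (st : List Int × PySem.Dict Int Int) k =>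
        let d := st.2.modify k 0 (· - 1)
        if d.getD k 0 == 0 then
          (PySem.List.sorted (st.1 ++ [k]) (fun y => pos.getD y 0), d)
        else (st.1, d)) (q, dA)).2.getD m 0 ≤ 0) := by
  induction ks with
  | nil =>
    intro q dA dB hsort hsub hpt hle
    exact ⟨rfl, hpt, hsort, hsub, hle⟩
  | cons k t ih =>
    intro q dA dB hsort hsub hpt hle
    have hkops : k ∈ ops := hks k List.mem_cons_self
    have htops : ∀ k' ∈ t, k' ∈ ops := fun k' h => hks k' (List.mem_cons_of_mem k h)
    simp only [List.foldl_cons]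
    have hd : ∀ y, (dA.modify k 0 (· - 1)).getD y 0 = (dB.modify k 0 (· - 1)).getD y 0 := by
      intro y
      simp only [PySem.Dict.getD_modify, hpt]
    by_cases hz : (dA.modify k 0 (· - 1)).getD k 0 == 0
    · have hzB : ((dB.modify k 0 (· - 1)).getD k 0 == 0) = true := by
        rw [← hd]; exact hz
      simp only [hz, hzB, if_true]
      -- k was strictly positive before the decrement, hence not in q
      have hkval : dA.getD k 0 = 1 := by
        have := PySem.Dict.getD_modify_self dA k 0 (· - 1)
        have hz' : (dA.modify k 0 (· - 1)).getD k 0 = 0 := by simpa using hz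
        omega
      have hknq : k ∉ q := fun hkq => by
        have := hle k hkq
        omega
      have hne : ∀ a ∈ q, pos.getD a 0 ≠ pos.getD k 0 := by
        intro a ha
        exact hkey a (hsub a ha) k hkops (fun h => hknq (h ▸ ha))
      rw [insertReadyB_eq_sorted pos q k hsort hne]
      have hsort' : (insertReadyB pos q k).Pairwise (fun a b => pos.getD a 0 < pos.getD b 0) := by
        rw [insertReadyB, List.pairwise_reverse]
        exact insScanB_pairwise pos k q.reverse
          (by rw [List.pairwise_reverse]; exact hsort)
          (fun a ha => hne a (List.mem_reverse.mp ha))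
      have hmemins : ∀ m ∈ insertReadyB pos q k, m = k ∨ m ∈ q := by
        intro m hm
        have : m ∈ k :: q := by
          have hp := (List.reverse_perm _).trans ((insScanB_perm pos k q.reverse).trans
            ((q.reverse_perm).cons k))
          exact hp.mem_iff.mp (by simpa [insertReadyB] using hm)
        simpa using this
      refine ih htops (insertReadyB pos q k) _ _ hsort' ?_ hd ?_
      · intro m hm
        rcases hmemins m hm with h | h
        · exact h ▸ hkops
        · exact hsub m h
      · intro m hm
        rcases hmemins m hm with h | h
        · subst h
          simp only [PySem.Dict.getD_modify_self]
          omega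
        · rcases eq_or_ne m k with h2 | h2
          · subst h2
            simp only [PySem.Dict.getD_modify_self]
            omega
          · rw [PySem.Dict.getD_modify_of_ne _ _ _ h2]
            exact hle m h
    · have hzB : ((dB.modify k 0 (· - 1)).getD k 0 == 0) = false := by
        rw [← hd]; simpa using hz
      simp only [hz, hzB, Bool.false_eq_true, if_false]
      refine ih htops q _ _ hsort hsub hd ?_
      intro m hm
      rcases eq_or_ne m k with h2 | h2
      · subst h2
        simp only [PySem.Dict.getD_modify_self]
        have := hle m hm
        omega
      · rw [PySem.Dict.getD_modify_of_ne _ _ _ h2]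
        exact hle m hm

lemma loop_sim (prec : PySem.Dict Int (List Int)) (ops : List Int)
    (preds : PySem.Dict Int (List Int)) (succ : PySem.Dict Int (List Int))
    (hpreds : ∀ k ∈ ops, preds.getD k [] = predListK prec ops k)
    (hsucc : ∀ j, succ.getD j [] = ops.filter (fun k => (predListK prec ops k).contains j))
    (pos : PySem.Dict Int Int)
    (hkey : ∀ a ∈ ops, ∀ b ∈ ops, a ≠ b → pos.getD a 0 ≠ pos.getD b 0) :
    ∀ (fuel : Nat) (q : List Int) (dA dB : PySem.Dict Int Int) (out : List Int),
    q.Pairwise (fun a b => pos.getD a 0 < pos.getD b 0) → (∀ m ∈ q, m ∈ ops) →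
    (∀ y, dA.getD y 0 = dB.getD y 0) → (∀ m ∈ q, dA.getD m 0 ≤ 0) → (∀ m ∈ out, m ∈ ops) →
    topoLoopA ops preds pos fuel q dA out = kahnLoopB succ pos fuel q dB out ∧
    (∀ m ∈ topoLoopA ops preds pos fuel q dA out, m ∈ ops) := by
  intro fuel
  induction fuel with
  | zero =>
    intro q dA dB out _ _ _ _ hout
    simp only [topoLoopA, kahnLoopB]
    exact ⟨trivial, hout⟩
  | succ fuel ihf =>
    intro q dA dB out hsort hsub hpt hle hout
    match q with
    | [] =>
      simp only [topoLoopA, kahnLoopB]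
      exact ⟨trivial, hout⟩
    | j :: rest =>
      simp only [topoLoopA, kahnLoopB]
      have hAfold : ops.foldl (fun (st : List Int × PySem.Dict Int Int) k =>
          if (preds.getD k []).contains j then
            let d := st.2.modify k 0 (· - 1)
            if d.getD k 0 == 0 then
              (PySem.List.sorted (st.1 ++ [k]) (fun y => pos.getD y 0), d)
            else (st.1, d)
          else st) (rest, dA) =
        (succ.getD j []).foldl (fun (st : List Int × PySem.Dict Int Int) k =>
            let d := st.2.modify k 0 (· - 1)
            if d.getD k 0 == 0 then
              (PySem.List.sorted (st.1 ++ [k]) (fun y => pos.getD y 0), d)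
            else (st.1, d)) (rest, dA) := by
        rw [← List.foldl_filter]
        rw [List.filter_congr (fun k hk => by rw [hpreds k hk])]
        rw [← hsucc j]
      rw [hAfold]
      have hsortr : rest.Pairwise (fun a b => pos.getD a 0 < pos.getD b 0) :=
        (List.pairwise_cons.mp hsort).2
      have hsubr : ∀ m ∈ rest, m ∈ ops := fun m h => hsub m (List.mem_cons_of_mem j h)
      have hler : ∀ m ∈ rest, dA.getD m 0 ≤ 0 := fun m h => hle m (List.mem_cons_of_mem j h)
      have hksub : ∀ k ∈ succ.getD j [], k ∈ ops := by
        intro k hk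
        rw [hsucc j] at hk
        exact List.mem_of_mem_filter hk
      obtain ⟨h1, h2, h3, h4, h5⟩ :=
        inner_sim pos ops hkey (succ.getD j []) hksub rest dA dB hsortr hsubr hpt hler
      rw [← h1]
      exact ihf _ _ _ (out ++ [j]) h3 h4 h2 h5 (by
        intro m hm
        rcases List.mem_append.mp hm with h | h
        · exact hout m h
        · exact (List.mem_singleton.mp h) ▸ hsub j List.mem_cons_self)

-- the two programs agree once the shared dedup prefix is factored out
lemma main_eq (prec : PySem.Dict Int (List Int)) (ops flags : List Int)
    (hn : ops.Nodup) (hlen : ops.length = flags.length) :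
    (topo_sort ops prec,
      ensure_flags_feasible (topo_sort ops prec)
        ((topo_sort ops prec).map
          (fun op => PySem.List.pyGetD flags ((pyEnumDict ops).getD op 0) 0)) prec) =
    (let pos := pyEnumDict ops
     let bs := buildB prec pos ops
     let ready := ops.filter (fun op => bs.1.getD op 0 == 0)
     let order := kahnLoopB bs.2 pos ops.length ready bs.1 []
     let seq_fixed := if order.length == ops.length then order else ops
     let flag_of := PySem.Dict.ofList (ops.zip flags)
     let x0 := seq_fixed.map (fun op => flag_of.getD op 0)
     let posf := pyEnumDict seq_fixed
     let xf := seq_fixed.zipIdx.foldl (fun xc q =>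
       if PySem.List.pyGetD xc (q.2 : Int) 0 == 1 then
         (prec.getD q.1 []).foldl (fun xc2 p =>
           if posf.contains p then PySem.List.pySetD xc2 (posf.getD p 0) 1 else xc2) xc
       else xc) x0
     (seq_fixed, xf)) := by
  -- key-function facts
  have hgetd : ∀ (i : Nat) (hi : i < ops.length), (pyEnumDict ops).getD ops[i] 0 = (i : Int) :=
    pyEnumDict_getD ops hn
  have hkey : ∀ a ∈ ops, ∀ b ∈ ops, a ≠ b →
      (pyEnumDict ops).getD a 0 ≠ (pyEnumDict ops).getD b 0 := by
    intro a ha b hb hab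
    obtain ⟨i, hi, rfl⟩ := List.getElem_of_mem ha
    obtain ⟨j, hj, rfl⟩ := List.getElem_of_mem hb
    rw [hgetd i hi, hgetd j hj]
    intro h
    have : i = j := by exact_mod_cast h
    exact hab (by simp [this])
  have hpair : ops.Pairwise (fun a b => (pyEnumDict ops).getD a 0 < (pyEnumDict ops).getD b 0) := by
    rw [List.pairwise_iff_getElem]
    intro i j hi hj hij
    rw [hgetd i hi, hgetd j hj]
    exact_mod_cast hij
  -- A-side graph pieces
  have hpreds := predsA_getD prec ops hn
  have hindeg : ∀ y, ((ops.foldl (fun d j =>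
      d.insert j ((prec.getD j []).filter (fun p => PySem.Set.contains ops p)))
      PySem.Dict.empty).items.foldl
        (fun d jp => jp.2.foldl (fun d2 _ => d2.modify jp.1 (0 : Int) (· + 1)) d)
        (ops.foldl (fun d j => d.insert j (0 : Int)) PySem.Dict.empty)).getD y 0 =
      (buildB prec (pyEnumDict ops) ops).1.getD y 0 := by
    intro y
    rw [predsA_items prec ops hn, indegA_getD prec ops hn,
      buildB_indeg prec (pyEnumDict ops) ops hn (pyEnumDict_contains ops)]
  -- the initial ready queues agree
  have hfilter : ops.filter (fun j => ((ops.foldl (fun d j =>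
      d.insert j ((prec.getD j []).filter (fun p => PySem.Set.contains ops p)))
      PySem.Dict.empty).items.foldl
        (fun d jp => jp.2.foldl (fun d2 _ => d2.modify jp.1 (0 : Int) (· + 1)) d)
        (ops.foldl (fun d j => d.insert j (0 : Int)) PySem.Dict.empty)).getD j 0 == 0) =
      ops.filter (fun op => (buildB prec (pyEnumDict ops) ops).1.getD op 0 == 0) :=
    List.filter_congr (fun j _ => by rw [hindeg j])
  have hfpair := hpair.sublist (List.filter_sublist
    (p := fun op => (buildB prec (pyEnumDict ops) ops).1.getD op 0 == 0) (l := ops))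
  have hsorted : PySem.List.sorted
      (ops.filter (fun op => (buildB prec (pyEnumDict ops) ops).1.getD op 0 == 0))
      (fun j => (pyEnumDict ops).getD j 0) =
      ops.filter (fun op => (buildB prec (pyEnumDict ops) ops).1.getD op 0 == 0) :=
    PySem.List.sorted_eq_of_perm_of_pairwise_lt _ _ _ (List.Perm.refl _) hfpair
  -- the loops agree
  obtain ⟨hloop, hmem⟩ := loop_sim prec ops _ _ hpreds
    (buildB_succ prec (pyEnumDict ops) ops (pyEnumDict_contains ops))
    (pyEnumDict ops) hkey ops.length
    (ops.filter (fun op => (buildB prec (pyEnumDict ops) ops).1.getD op 0 == 0))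
    ((ops.foldl (fun d j =>
      d.insert j ((prec.getD j []).filter (fun p => PySem.Set.contains ops p)))
      PySem.Dict.empty).items.foldl
        (fun d jp => jp.2.foldl (fun d2 _ => d2.modify jp.1 (0 : Int) (· + 1)) d)
        (ops.foldl (fun d j => d.insert j (0 : Int)) PySem.Dict.empty))
    (buildB prec (pyEnumDict ops) ops).1 []
    hfpair
    (fun m hm => List.mem_of_mem_filter hm)
    hindeg
    (by
      intro m hm
      have := List.of_mem_filter hm
      have h0 : (buildB prec (pyEnumDict ops) ops).1.getD m 0 = 0 := by simpa using this
      rw [hindeg m, h0])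
    (by intro m hm; simp at hm)
  -- assemble
  show (topo_sort ops prec, _) = _
  rw [topo_sort]
  simp only [PySem.Set.ofList_eq_self_of_nodup ops hn]
  rw [hfilter, hsorted, hloop]
  set order := kahnLoopB (buildB prec (pyEnumDict ops) ops).2 (pyEnumDict ops) ops.length
    (ops.filter (fun op => (buildB prec (pyEnumDict ops) ops).1.getD op 0 == 0))
    (buildB prec (pyEnumDict ops) ops).1 [] with horder
  rw [hloop] at hmem
  -- the fallback branches coincide
  have hsf : (if order.length ≠ ops.length then ops else order) =
      (if (order.length == ops.length) = true then order else ops) := by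
    by_cases h : order.length = ops.length <;> simp [h]
  rw [hsf]
  set seq_fixed := if (order.length == ops.length) = true then order else ops with hseq
  have hsfmem : ∀ m ∈ seq_fixed, m ∈ ops := by
    intro m hm
    rw [hseq] at hm
    by_cases h : order.length = ops.length
    · simp only [h, beq_self_eq_true, if_true] at hm
      exact hmem m hm
    · simp only [beq_iff_eq, h, if_false] at hm
      exact hm
  -- the re-aligned flag vectors coincide
  have hx0 : seq_fixed.map (fun op => PySem.List.pyGetD flags ((pyEnumDict ops).getD op 0) 0) =
      seq_fixed.map (fun op => (PySem.Dict.ofList (ops.zip flags)).getD op 0) := by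
    refine List.map_congr_left ?_
    intro op hop
    obtain ⟨i, hi, rfl⟩ := List.getElem_of_mem (hsfmem op hop)
    rw [hgetd i hi, zipDict_getD ops flags hn hlen i hi]
    rw [PySem.List.pyGetD_natCast]
    exact List.getD_eq_getElem flags 0 (hlen ▸ hi)
  rw [hx0]
  rw [ensure_flags_feasible]

-- ===== VERDICT (by name: the statement is the Claim_ definition above) =====
theorem make_individual_spec : Claim_equal_make_individual := by
  intro seq x precedence _ _
  unfold Spec_make_individual make_individual make_individual_alt
  exact main_eq (PySem.Dict.ofList precedence) (pyDedup (seq.zip x)).2.1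
    (pyDedup (seq.zip x)).2.2 (pyDedup_nodup _) (pyDedup_len _)
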